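-- pv_equiv track=rewrite | github.com/shkitan/ANLP_project | anlp_proj/src/preprocessing/smokers.py | obj_process
-- ===== SOURCE A (Python) =====
-- def is_word_uppercase(word):
--     for char in word:
--         if char == " ":
--             continue
--         if not char.isupper():
--             return False
--     return True
--
-- def obj_process(text, cat_names):
--     lines = text.split('\n')
--     dict_cat_text = {}
--     # dict_cat_text['meta_data'] = lines[0]
--     meata = True
--     text = lines[0]
--     cur_cat = 'meta_data'
--     for line in lines[1:]:
--         if ':' in line and is_word_uppercase(line.split(':')[0]):
--             dict_cat_text[cur_cat] = text
--             cur_cat = line.split(':')[0]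
--             text = line.split(':')[1]
--         else:
--             text += '\n'
--             text += line
--             continue
--     dict_cat_text[cur_cat] = text
--     return dict_cat_text
-- ===== SOURCE B (Python) =====
-- def obj_process(text, cat_names):
--     lines = text.split('\n')
--
--     def is_header(line):
--         if ':' not in line:
--             return False
--         prefix = line.split(':')[0]
--         for c in prefix:
--             if c != ' ' and not c.isupper():
--                 return False
--         return True
--
--     def first_header(rest):
--         # index of the first header line in rest (len(rest) if none)
--         i = 0
--         while i < len(rest) and not is_header(rest[i]):
--             i += 1
--         return i
--
--     # phase 1: cut the tail into (key, seed, body-lines) segments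
--     pairs = []
--     key, seed = 'meta_data', lines[0]
--     rest = lines[1:]
--     while True:
--         i = first_header(rest)
--         pairs.append((key, '\n'.join([seed] + rest[:i])))
--         if i == len(rest):
--             break
--         parts = rest[i].split(':')
--         key, seed = parts[0], parts[1]
--         rest = rest[i + 1:]
--     # phase 2: build the dict (a later repeated key overwrites the earlier one)
--     result = {}
--     for k, v in pairs:
--         result[k] = v
--     return result
-- ===== Notes on version B (the rewrite author's own statement) =====
-- stated objective: alternative
-- what changed: A's single accumulate-and-cut loop (mutable current key/text, dict written at each boundary) is replaced by a two-phase decomposition: scan for the next header to cut the line list into (key, seed, body) segments, '\n'.join each segment into a (key, value) pair list, then build the dict from that list at the end.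
import Mathlib
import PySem

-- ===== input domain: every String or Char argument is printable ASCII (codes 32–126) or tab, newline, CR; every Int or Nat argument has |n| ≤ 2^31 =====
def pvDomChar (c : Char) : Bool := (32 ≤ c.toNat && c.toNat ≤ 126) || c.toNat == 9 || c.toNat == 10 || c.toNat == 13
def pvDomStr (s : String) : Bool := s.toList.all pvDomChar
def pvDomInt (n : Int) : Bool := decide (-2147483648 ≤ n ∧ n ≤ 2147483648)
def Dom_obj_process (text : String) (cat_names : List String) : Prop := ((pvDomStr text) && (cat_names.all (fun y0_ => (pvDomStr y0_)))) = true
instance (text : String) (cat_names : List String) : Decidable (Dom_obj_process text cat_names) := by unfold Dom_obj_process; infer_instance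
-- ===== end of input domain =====

-- B re-decomposes A's single accumulate-and-cut loop into two phases — cut the line list
-- into (key, seed, body) segments with an explicit scan-for-next-header, '\n'.join each
-- segment, then build the dict from the pair list — same return value (objective: alternative).

-- ===== PORT A =====
-- is_word_uppercase: loop over the word's characters
def isWordUpper : List Char → Bool
  | [] => true
  | c :: t =>
    if c = ' ' then isWordUpper t
    else if !(PySem.Chars.isupper c) then false
    else isWordUpper t

def obj_process (text : String) (cat_names : List String) : List (String × String) :=
  -- lines = text.split('\n'); the separator is a nonempty literal, so split? = some …
  let lines := (PySem.Str.split? text "\n").getD []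
  -- text = lines[0]: split always returns a nonempty list, so this never raises
  let st := (lines.drop 1).foldl
    (fun (st : PySem.Dict String String × String × String) line =>
      if PySem.Str.isIn ":" line
          && isWordUpper (((PySem.Str.split? line ":").getD []).headD "").toList then
        (st.1.insert st.2.1 st.2.2,
         ((PySem.Str.split? line ":").getD []).headD "",
         -- line.split(':')[1]: in this branch ':' ∈ line, so index 1 exists
         ((PySem.Str.split? line ":").getD []).getD 1 "")
      else
        (st.1, st.2.1, st.2.2 ++ "\n" ++ line))
    (PySem.Dict.empty, "meta_data", lines.headD "")
  (st.1.insert st.2.1 st.2.2).items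

-- ===== PORT B =====
-- is_header: early-exit on ':' absence, then one pass over the prefix
def altPrefixOk : List Char → Bool
  | [] => true
  | c :: t => if c ≠ ' ' && !(PySem.Chars.isupper c) then false else altPrefixOk t

def altIsHeader (line : String) : Bool :=
  if !(PySem.Str.isIn ":" line) then false
  else altPrefixOk (((PySem.Str.split? line ":").getD []).headD "").toList

-- first_header: the while loop counting non-header lines from the front
def firstHeader : List String → Nat
  | [] => 0
  | l :: t => if altIsHeader l then 0 else 1 + firstHeader t

theorem firstHeader_le (rest : List String) : firstHeader rest ≤ rest.length := by
  induction rest with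
  | nil => simp [firstHeader]
  | cons l t ih => simp only [firstHeader, List.length_cons]; split <;> omega

-- the outer 'while True' loop of phase 1 (rest[:i]/rest[i:] are take/drop: 0 ≤ i ≤ len)
def segLoop (key seed : String) (rest : List String) : List (String × String) :=
  let i := firstHeader rest
  let pair := (key, PySem.Str.join "\n" (seed :: rest.take i))
  if i = rest.length then [pair]
  else
    let parts := (PySem.Str.split? (rest.getD i "") ":").getD []
    pair :: segLoop (parts.headD "") (parts.getD 1 "") (rest.drop (i + 1))
termination_by rest.length
decreasing_by
  have := firstHeader_le rest
  simp only [List.length_drop]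
  omega

def obj_process_alt (text : String) (cat_names : List String) : List (String × String) :=
  let lines := (PySem.Str.split? text "\n").getD []
  let pairs := segLoop "meta_data" (lines.headD "") (lines.drop 1)
  (pairs.foldl (fun (d : PySem.Dict String String) kv => d.insert kv.1 kv.2)
    PySem.Dict.empty).items

-- ===== PRECONDITION & SPEC =====
def Spec_obj_process (text : String) (cat_names : List String) (out : List (String × String)) : Prop := out = obj_process_alt text cat_names
instance (text : String) (cat_names : List String) (out : List (String × String)) : Decidable (Spec_obj_process text cat_names out) := by unfold Spec_obj_process; infer_instance

-- ===== CLAIM (what is proved, stated in full; the proofs are below) =====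
def Claim_equal_obj_process : Prop := ∀ (text : String) (cat_names : List String), Dom_obj_process text cat_names → Spec_obj_process text cat_names (obj_process text cat_names)

-- ===== LEMMAS AND PROOFS =====

-- the header test as A writes it
def aHeader (line : String) : Bool :=
  PySem.Str.isIn ":" line
    && isWordUpper (((PySem.Str.split? line ":").getD []).headD "").toList

-- common intermediate: the segment list in A's accumulate shape
def segsAcc (key txt : String) : List String → List (String × String)
  | [] => [(key, txt)]
  | l :: r =>
    if aHeader l then
      (key, txt) :: segsAcc (((PySem.Str.split? l ":").getD []).headD "")
                            (((PySem.Str.split? l ":").getD []).getD 1 "") r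
    else segsAcc key (txt ++ "\n" ++ l) r

theorem altPrefixOk_eq_isWordUpper (w : List Char) : altPrefixOk w = isWordUpper w := by
  induction w with
  | nil => rfl
  | cons c t ih =>
    simp only [altPrefixOk, isWordUpper]
    by_cases h : c = ' '
    · simp [h, ih]
    · cases hu : PySem.Chars.isupper c <;> simp [h, hu, ih]

theorem altIsHeader_eq_aHeader (l : String) : altIsHeader l = aHeader l := by
  unfold altIsHeader aHeader
  cases h : PySem.Str.isIn ":" l <;> simp [h, altPrefixOk_eq_isWordUpper]

theorem join_cons_cons_nl (a b : String) (t : List String) :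
    PySem.Str.join "\n" (a :: b :: t) = PySem.Str.join "\n" ((a ++ "\n" ++ b) :: t) := by
  have : (PySem.Str.join "\n" (a :: b :: t)).toList
      = (PySem.Str.join "\n" ((a ++ "\n" ++ b) :: t)).toList := by
    cases t with
    | nil =>
      simp [PySem.Str.toList_join, PySem.Chars.join_cons_cons, PySem.Chars.join_singleton,
        String.toList_append]
    | cons q t' =>
      simp [PySem.Str.toList_join, PySem.Chars.join_cons_cons, String.toList_append]
  exact String.toList_inj.mp this

theorem join_singleton_str (a : String) : PySem.Str.join "\n" [a] = a := by
  have : (PySem.Str.join "\n" [a]).toList = a.toList := by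
    simp [PySem.Str.toList_join, PySem.Chars.join_singleton]
  exact String.toList_inj.mp this

theorem segLoop_cons_nonheader (key seed l : String) (r : List String)
    (h : altIsHeader l = false) :
    segLoop key seed (l :: r) = segLoop key (seed ++ "\n" ++ l) r := by
  rw [segLoop, segLoop]
  have hf : firstHeader (l :: r) = 1 + firstHeader r := by simp [firstHeader, h]
  simp only [hf, List.length_cons]
  have hj : PySem.Str.join "\n" (seed :: (l :: r).take (1 + firstHeader r))
      = PySem.Str.join "\n" ((seed ++ "\n" ++ l) :: r.take (firstHeader r)) := by
    have ht : (l :: r).take (1 + firstHeader r) = l :: r.take (firstHeader r) := by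
      rw [Nat.add_comm]; simp [List.take_succ_cons]
    rw [ht, join_cons_cons_nl]
  by_cases he : firstHeader r = r.length
  · rw [if_pos (by omega : 1 + firstHeader r = r.length + 1), if_pos he]
    rw [he] at hj
    rw [he, hj, List.take_length]
  · have hne : ¬ (1 + firstHeader r = r.length + 1) := by omega
    rw [if_neg hne, if_neg he, hj]
    have hg : (l :: r).getD (1 + firstHeader r) "" = r.getD (firstHeader r) "" := by
      rw [Nat.add_comm]; rfl
    have hd : (l :: r).drop (1 + firstHeader r + 1) = r.drop (firstHeader r + 1) := by
      rw [show 1 + firstHeader r + 1 = (firstHeader r + 1) + 1 by omega, List.drop_succ_cons]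
    rw [hg, hd]

theorem segLoop_eq_segsAcc (rest : List String) : ∀ key seed,
    segLoop key seed rest = segsAcc key seed rest := by
  induction rest with
  | nil =>
    intro key seed
    rw [segLoop]
    simp [firstHeader, segsAcc, join_singleton_str]
  | cons l r ih =>
    intro key seed
    by_cases h : altIsHeader l = true
    · rw [segLoop]
      have hf : firstHeader (l :: r) = 0 := by simp [firstHeader, h]
      have hA : aHeader l = true := by rw [← altIsHeader_eq_aHeader]; exact h
      rw [if_neg (by simp [hf] : ¬ firstHeader (l :: r) = (l :: r).length)]
      simp only [hf, List.take_zero, List.getD, List.getElem?_cons_zero, Option.getD_some,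
        List.drop_succ_cons, List.drop_zero]
      rw [join_singleton_str, segsAcc, if_pos hA, ih]
      simp [List.getD]
    · have h' : altIsHeader l = false := by
        cases hh : altIsHeader l
        · rfl
        · exact absurd hh h
      have hA : aHeader l = false := by rw [← altIsHeader_eq_aHeader]; exact h'
      rw [segLoop_cons_nonheader key seed l r h', ih, segsAcc, if_neg (by simp [hA])]

theorem foldA_eq_segsAcc (rest : List String) : ∀ (d : PySem.Dict String String) key txt,
    (let st := rest.foldl
      (fun (st : PySem.Dict String String × String × String) line =>
        if PySem.Str.isIn ":" line
            && isWordUpper (((PySem.Str.split? line ":").getD []).headD "").toList then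
          (st.1.insert st.2.1 st.2.2,
           ((PySem.Str.split? line ":").getD []).headD "",
           ((PySem.Str.split? line ":").getD []).getD 1 "")
        else (st.1, st.2.1, st.2.2 ++ "\n" ++ line)) (d, key, txt)
     st.1.insert st.2.1 st.2.2)
    = (segsAcc key txt rest).foldl
        (fun (d : PySem.Dict String String) kv => d.insert kv.1 kv.2) d := by
  induction rest with
  | nil => intro d key txt; simp [segsAcc]
  | cons l r ih =>
    intro d key txt
    by_cases h : aHeader l = true
    · have h' : (PySem.Str.isIn ":" l
          && isWordUpper (((PySem.Str.split? l ":").getD []).headD "").toList) = true := h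
      simp only [List.foldl_cons]
      rw [if_pos h']
      rw [segsAcc, if_pos h, List.foldl_cons]
      exact ih (d.insert key txt) _ _
    · have h' : (PySem.Str.isIn ":" l
          && isWordUpper (((PySem.Str.split? l ":").getD []).headD "").toList) = false := by
        cases hh : (PySem.Str.isIn ":" l
          && isWordUpper (((PySem.Str.split? l ":").getD []).headD "").toList)
        · rfl
        · exact absurd hh h
      simp only [List.foldl_cons]
      rw [if_neg (fun hc => by rw [h'] at hc; exact Bool.false_ne_true hc)]
      have hA : aHeader l = false := h'
      rw [segsAcc, if_neg (by simp [hA])]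
      exact ih d key (txt ++ "\n" ++ l)

-- ===== VERDICT (by name: the statement is the Claim_ definition above) =====
theorem obj_process_spec : Claim_equal_obj_process := by
  intro text cat_names _
  unfold Spec_obj_process
  exact (congrArg PySem.Dict.items
      (foldA_eq_segsAcc _ PySem.Dict.empty "meta_data" _)).trans
    (congrArg
      (fun p => (List.foldl (fun (d : PySem.Dict String String) kv => d.insert kv.1 kv.2)
        PySem.Dict.empty p).items)
      (segLoop_eq_segsAcc _ "meta_data" _)).symm
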